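-- pv_equiv track=rewrite | github.com/alicehhhs/cryp | k3/lab3_1.py | modular_equation_solver
-- ===== SOURCE A (Python) =====
-- def greatest_common_divisor(a, b):
--     if b == 0:
--         return abs(a)
--     else:
--         return greatest_common_divisor(b, a % b)
--
-- def extended_euclidean_algorithm(a, n):
--     res = [0, 1]
--     while n != 0 and a != 0:
--         if n < a:
--             res.append(a // n)
--             a = a % n
--         elif n > a:
--             res.append(n // a)
--             n = n % a
--     for i in range(2, len(res) - 1):
--         res[i] = res[i - 2] + (-res[i] * res[i - 1])
--     return res[-2]
--
-- def modular_equation_solver(a, b, n):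
--     a = a % n
--     b = b % n
--     d = greatest_common_divisor(a, n)
--     result = []
--     if d == 1:
--         x = (extended_euclidean_algorithm(a, n) * b) % n
--         result.append(x)
--         return result
--     else:
--         if b % d == 0:
--             a = a // d
--             b = b // d
--             n = n // d
--             x = (modular_equation_solver(a, b, n)[0])
--             result.append(x)
--             for i in range(1, d):
--                 result.append(result[-1] + n)
--             return result
--         else:
--             return result
-- ===== SOURCE B (Python) =====
-- def modular_equation_solver(a, b, n):
--     a %= n
--     b %= n
--     old_r, r = n, a
--     old_s, s = 0, 1
--     while r != 0:
--         q = old_r // r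
--         old_r, r = r, old_r - q * r
--         old_s, s = s, old_s - q * s
--     g, x = old_r, old_s
--     if b % g != 0:
--         return []
--     m = n // g
--     x0 = x * (b // g) % m
--     return [x0 + k * m for k in range(g)]
-- ===== Notes on version B (the rewrite author's own statement) =====
-- stated objective: simpler
-- what changed: A's recursive gcd, hand-rolled quotient-list/back-substitution extended Euclid and self-recursive divide-by-gcd solver are replaced by one standard iterative extended-gcd loop plus a direct closed-form solution list [x0 + k*m for k in range(g)].
-- outside the precondition, e.g. on modular_equation_solver(0, 0, -3): A returns [0, -1, -2], B returns []; on modular_equation_solver(5, 3, 0): A raises ZeroDivisionError, B raises ZeroDivisionError; on modular_equation_solver(2, 4, -6): A does not finish within the time limit, B returns []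
import Mathlib
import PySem

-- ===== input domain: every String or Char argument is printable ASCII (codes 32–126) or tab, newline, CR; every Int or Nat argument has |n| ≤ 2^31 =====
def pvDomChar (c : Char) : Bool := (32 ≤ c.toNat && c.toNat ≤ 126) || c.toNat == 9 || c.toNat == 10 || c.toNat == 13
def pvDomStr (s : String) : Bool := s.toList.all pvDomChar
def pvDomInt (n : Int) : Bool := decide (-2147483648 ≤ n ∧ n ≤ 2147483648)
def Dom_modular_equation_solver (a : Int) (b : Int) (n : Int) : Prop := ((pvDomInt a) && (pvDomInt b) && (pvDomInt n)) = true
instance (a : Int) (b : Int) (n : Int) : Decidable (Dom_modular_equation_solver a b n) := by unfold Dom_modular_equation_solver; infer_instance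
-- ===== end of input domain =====

-- B replaces A's recursive gcd + quotient-list/back-substitution extended Euclid + self-recursive
-- divide-down solver by ONE standard iterative extended-gcd loop and a direct closed-form solution list
-- (objective: simpler).

-- Termination fact both loop ports cite: |a fmod b| < |b| for b ≠ 0 (Python's % takes the divisor's sign).
theorem pv_natAbs_fmod_lt (a b : Int) (h : b ≠ 0) : (Int.fmod a b).natAbs < b.natAbs := by
  have he : Int.fmod a b = a % b + if 0 ≤ b ∨ b ∣ a then 0 else b := Int.fmod_eq_emod
  have h1 : 0 ≤ a % b := Int.emod_nonneg a h
  have h2 : a % b < |b| := Int.emod_lt_abs a h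
  rcases le_or_gt b 0 with hb | hb
  · rw [abs_of_nonpos hb] at h2
    split_ifs at he with hd
    · rcases hd with hd | hd
      · omega
      · have : a % b = 0 := Int.emod_eq_zero_of_dvd hd
        omega
    · omega
  · rw [abs_of_pos hb] at h2
    rw [he]
    split_ifs with hd
    · omega
    · exact absurd (Or.inl hb.le) hd

-- ===== PORT A =====
-- greatest_common_divisor(a, b): recursive Euclid with Python's %
def greatest_common_divisor (a b : Int) : Int :=
  if h : b = 0 then |a|
  else greatest_common_divisor b (PySem.Int.mod a b)
termination_by b.natAbs
decreasing_by exact pv_natAbs_fmod_lt a b h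

-- the while-loop of extended_euclidean_algorithm, collecting quotients into res.
-- Fuel only guards totality (Python loops forever when a == n ≠ 0; unreachable under Pre_).
def eeaLoop : Nat → Int → Int → List Int → List Int
  | 0, _, _, res => res
  | fuel+1, a, n, res =>
    if n ≠ 0 ∧ a ≠ 0 then
      if n < a then eeaLoop fuel (PySem.Int.mod a n) n (res ++ [PySem.Int.floordiv a n])
      else if a < n then eeaLoop fuel a (PySem.Int.mod n a) (res ++ [PySem.Int.floordiv n a])
      else eeaLoop fuel a n res
    else res

-- the in-place back-substitution loop `for i in range(2, len(res)-1): res[i] = res[i-2] + (-res[i]*res[i-1])`,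
-- carrying the two previously written cells p2 p1; the last cell is left untouched, exactly as in Python.
def eeaFix (p2 p1 : Int) : List Int → List Int
  | [] => []
  | [q] => [q]
  | q :: q' :: rest => (p2 + (-q * p1)) :: eeaFix p1 (p2 + (-q * p1)) (q' :: rest)

def extended_euclidean_algorithm (a n : Int) : Int :=
  let res := eeaLoop (a.natAbs + n.natAbs + 1) a n [0, 1]
  let res2 := match res with
    | r0 :: r1 :: qs => r0 :: r1 :: eeaFix r0 r1 qs
    | other => other
  -- res always has ≥ 2 elements, so res[-2] never raises and the default is dead
  (PySem.List.pyGet? res2 (-2)).getD 0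

-- modular_equation_solver body; fuel only guards totality of the self-recursion
-- (for n > 0 the recursion depth is ≤ 2, so the fuel below never runs out under Pre_).
def mesCore : Nat → Int → Int → Int → List Int
  | 0, _, _, _ => []
  | fuel+1, a, b, n =>
    let a' := PySem.Int.mod a n
    let b' := PySem.Int.mod b n
    let d := greatest_common_divisor a' n
    if d = 1 then
      [PySem.Int.mod (extended_euclidean_algorithm a' n * b') n]
    else
      if PySem.Int.mod b' d = 0 then
        let a2 := PySem.Int.floordiv a' d
        let b2 := PySem.Int.floordiv b' d
        let n2 := PySem.Int.floordiv n d
        -- result[0] of the recursive call; nonempty for n > 0, so the default is dead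
        let x := ((mesCore fuel a2 b2 n2).head?).getD 0
        (PySem.List.pyRange 1 d).foldl
          (fun res _ => res ++ [((PySem.List.pyGet? res (-1)).getD 0) + n2]) [x]
      else []

def modular_equation_solver (a : Int) (b : Int) (n : Int) : List Int :=
  mesCore (n.natAbs + 1) a b n

-- ===== PORT B =====
-- the while-loop of Source B: standard iterative extended gcd
def egcdLoop (old_r r old_s s : Int) : Int × Int :=
  if h : r = 0 then (old_r, old_s)
  else
    let q := PySem.Int.floordiv old_r r
    egcdLoop r (old_r - q * r) s (old_s - q * s)
termination_by r.natAbs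
decreasing_by
  have : old_r - PySem.Int.floordiv old_r r * r = Int.fmod old_r r := by
    have := Int.fmod_add_fdiv old_r r
    simp only [PySem.Int.floordiv]
    linarith
  rw [this]; exact pv_natAbs_fmod_lt old_r r h

def modular_equation_solver_alt (a : Int) (b : Int) (n : Int) : List Int :=
  let a' := PySem.Int.mod a n
  let b' := PySem.Int.mod b n
  let gx := egcdLoop n a' 0 1
  let g := gx.1
  let x := gx.2
  if PySem.Int.mod b' g ≠ 0 then []
  else
    let m := PySem.Int.floordiv n g
    let x0 := PySem.Int.mod (x * PySem.Int.floordiv b' g) m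
    (PySem.List.pyRange 0 g).map (fun k => x0 + k * m)

-- ===== PRECONDITION & SPEC =====
-- Pre_ excludes n ≤ 0: there A raises ZeroDivisionError (n = 0) or, except for accidental corners,
-- loops forever inside extended_euclidean_algorithm (n < 0).
def Pre_modular_equation_solver (a : Int) (b : Int) (n : Int) : Prop := 0 < n
instance (a : Int) (b : Int) (n : Int) : Decidable (Pre_modular_equation_solver a b n) := by unfold Pre_modular_equation_solver; infer_instance
def pvWitness_modular_equation_solver : Int × Int × Int := (2, 4, 6)

def Spec_modular_equation_solver (a : Int) (b : Int) (n : Int) (out : List Int) : Prop := out = modular_equation_solver_alt a b n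
instance (a : Int) (b : Int) (n : Int) (out : List Int) : Decidable (Spec_modular_equation_solver a b n out) := by unfold Spec_modular_equation_solver; infer_instance

-- ===== CLAIM (what is proved, stated in full; the proofs are below) =====
def Claim_equal_modular_equation_solver : Prop := ∀ (a : Int) (b : Int) (n : Int), Dom_modular_equation_solver a b n → Pre_modular_equation_solver a b n → Spec_modular_equation_solver a b n (modular_equation_solver a b n)

-- ===== LEMMAS AND PROOFS =====

-- ---- proof-side helpers ----

-- step of the back-substitution loop as a pure fold step
def pvStep (s : Int × Int) (q : Int) : Int × Int := (s.2, s.1 - q * s.2)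

-- quotient list of the Euclidean algorithm on (x, y)
def euclidQuots (x y : Int) : List Int :=
  if h : 0 < y then Int.fdiv x y :: euclidQuots y (Int.fmod x y) else []
termination_by y.natAbs
decreasing_by exact pv_natAbs_fmod_lt x y (by omega)

-- last / second-to-last element via Python's negative indexing
def pvL1 (xs : List Int) : Int := (PySem.List.pyGet? xs (-1)).getD 0
def pvL2 (xs : List Int) : Int := (PySem.List.pyGet? xs (-2)).getD 0

theorem pv_pvL2_eq (ys : List Int) (h : 2 ≤ ys.length) :
    pvL2 ys = ys[ys.length - 2]?.getD 0 := by
  unfold pvL2 PySem.List.pyGet? PySem.List.pyIdx?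
  have c1 : ¬ ((0:Int) ≤ -2) := by norm_num
  have c2 : -(ys.length:Int) ≤ -2 := by omega
  rw [if_neg c1, if_pos c2]
  rw [show ((-(-2:Int)).toNat) = 2 from rfl]
  norm_num

theorem pv_pvL1_eq (ys : List Int) (h : 1 ≤ ys.length) :
    pvL1 ys = ys[ys.length - 1]?.getD 0 := by
  unfold pvL1 PySem.List.pyGet? PySem.List.pyIdx?
  have c1 : ¬ ((0:Int) ≤ -1) := by norm_num
  have c2 : -(ys.length:Int) ≤ -1 := by omega
  rw [if_neg c1, if_pos c2]
  rw [show ((-(-1:Int)).toNat) = 1 from rfl]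
  norm_num

theorem pv_pvL2_cons (x : Int) (xs : List Int) (h : 2 ≤ xs.length) :
    pvL2 (x :: xs) = pvL2 xs := by
  rw [pv_pvL2_eq _ (by simp; omega), pv_pvL2_eq _ h]
  simp only [List.length_cons]
  rw [show xs.length + 1 - 2 = (xs.length - 2) + 1 from by omega]
  simp

theorem pv_pvL1_append (ys : List Int) (y : Int) : pvL1 (ys ++ [y]) = y := by
  rw [pv_pvL1_eq _ (by simp)]
  simp

-- ---- gcd ----

theorem pv_gcd_fmod (a b : Int) : Int.gcd b (Int.fmod a b) = Int.gcd a b := by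
  have h : Int.fmod a b = a + -(Int.fdiv a b) * b := by
    have := Int.fmod_add_fdiv a b; linarith
  rw [h, Int.gcd_add_mul_right_right b a (-(Int.fdiv a b)), Int.gcd_comm]

theorem pv_gcd_eq (a b : Int) : greatest_common_divisor a b = (Int.gcd a b : Int) := by
  induction a, b using greatest_common_divisor.induct with
  | case1 a => rw [greatest_common_divisor]; simp only [dite_true]
               rw [Int.gcd_zero_right]; exact Int.abs_eq_natAbs a
  | case2 a b hb ih =>
    rw [greatest_common_divisor]; simp only [hb, dite_false]
    rw [ih]; norm_cast; rw [PySem.Int.mod, pv_gcd_fmod]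

-- ---- B's loop ----

theorem pv_egcdLoop_spec (N A : Int) (k : Nat) : ∀ (old_r r old_s s : Int),
    r.natAbs ≤ k →
    0 ≤ old_r → 0 ≤ r → old_s * A ≡ old_r [ZMOD N] → s * A ≡ r [ZMOD N] →
    (egcdLoop old_r r old_s s).1 = (Int.gcd old_r r : Int) ∧
    (egcdLoop old_r r old_s s).2 * A ≡ (Int.gcd old_r r : Int) [ZMOD N] := by
  induction k with
  | zero =>
    intro old_r r old_s s hk h1 h2 h3 h4
    have hr : r = 0 := by omega
    subst hr
    rw [egcdLoop]; simp only [dite_true]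
    have : (Int.gcd old_r 0 : Int) = old_r := by rw [Int.gcd_zero_right]; omega
    rw [this]; exact ⟨rfl, h3⟩
  | succ k ih =>
    intro old_r r old_s s hk h1 h2 h3 h4
    by_cases hr : r = 0
    · subst hr
      rw [egcdLoop]; simp only [dite_true]
      have : (Int.gcd old_r 0 : Int) = old_r := by rw [Int.gcd_zero_right]; omega
      rw [this]; exact ⟨rfl, h3⟩
    · rw [egcdLoop]; simp only [hr, dite_false]
      have hrpos : 0 < r := lt_of_le_of_ne h2 (Ne.symm hr)
      have hfm : old_r - PySem.Int.floordiv old_r r * r = Int.fmod old_r r := by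
        have := Int.fmod_add_fdiv old_r r
        simp only [PySem.Int.floordiv]; linarith
      have hg : (Int.gcd r (old_r - PySem.Int.floordiv old_r r * r) : Int) = (Int.gcd old_r r : Int) := by
        rw [hfm]; norm_cast; rw [pv_gcd_fmod]
      have h2' : 0 ≤ old_r - PySem.Int.floordiv old_r r * r := by
        rw [hfm]; exact Int.fmod_nonneg_of_pos old_r hrpos
      have hk' : (old_r - PySem.Int.floordiv old_r r * r).natAbs ≤ k := by
        rw [hfm]
        have := pv_natAbs_fmod_lt old_r r hr
        omega
      have h4' : (old_s - PySem.Int.floordiv old_r r * s) * A ≡ old_r - PySem.Int.floordiv old_r r * r [ZMOD N] := by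
        have hh := h3.sub ((h4).mul_left (PySem.Int.floordiv old_r r))
        calc (old_s - PySem.Int.floordiv old_r r * s) * A
            = old_s * A - PySem.Int.floordiv old_r r * (s * A) := by ring
          _ ≡ old_r - PySem.Int.floordiv old_r r * r [ZMOD N] := hh
      have := ih r (old_r - PySem.Int.floordiv old_r r * r) s (old_s - PySem.Int.floordiv old_r r * s) hk' h2 h2' h4 h4'
      rw [hg] at this
      exact this

-- ---- A's extended-Euclid loop ----

theorem pv_eeaLoop_sym (fuel : Nat) : ∀ (a n : Int) (res : List Int),
    eeaLoop fuel a n res = eeaLoop fuel n a res := by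
  induction fuel with
  | zero => intro a n res; rfl
  | succ f ih =>
    intro a n res
    rw [eeaLoop, eeaLoop]
    by_cases hc : n ≠ 0 ∧ a ≠ 0
    · have hc' : a ≠ 0 ∧ n ≠ 0 := ⟨hc.2, hc.1⟩
      rw [if_pos hc, if_pos hc']
      rcases lt_trichotomy a n with h | h | h
      · rw [if_neg (not_lt.mpr h.le), if_pos h, if_pos h]
        exact ih a (PySem.Int.mod n a) _
      · subst h
        simp
      · rw [if_pos h, if_neg (not_lt.mpr h.le), if_pos h]
        exact ih (PySem.Int.mod a n) n _
    · have hc' : ¬ (a ≠ 0 ∧ n ≠ 0) := fun h => hc ⟨h.2, h.1⟩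
      rw [if_neg hc, if_neg hc']

theorem pv_eeaLoop_quots (fuel : Nat) : ∀ (a n : Int) (res : List Int),
    0 ≤ a → a < n → a.natAbs + n.natAbs < fuel →
    eeaLoop fuel a n res = res ++ euclidQuots n a := by
  induction fuel with
  | zero => intro a n res _ _ h; omega
  | succ f ih =>
    intro a n res ha han hfuel
    rw [eeaLoop]
    by_cases ha0 : a = 0
    · subst ha0
      simp only [ne_eq, not_true_eq_false, and_false, if_false]
      rw [euclidQuots]; simp
    · have hn0 : n ≠ 0 := by omega
      have hapos : 0 < a := lt_of_le_of_ne ha (Ne.symm ha0)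
      rw [if_pos (show n ≠ 0 ∧ a ≠ 0 from ⟨hn0, ha0⟩), if_neg (not_lt.mpr han.le), if_pos han]
      have hfd : 1 ≤ Int.fdiv n a := by
        have he : Int.fdiv n a = n / a := by
          rw [Int.fdiv_eq_ediv]; simp [ha]
        rw [he, Int.le_ediv_iff_mul_le hapos]; omega
      have hfm1 : 0 ≤ Int.fmod n a := Int.fmod_nonneg_of_pos n hapos
      have hfm2 : Int.fmod n a < a := Int.fmod_lt_of_pos n hapos
      have hfm_le : Int.fmod n a ≤ n - a := by
        have := Int.fmod_add_fdiv n a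
        nlinarith [hfd]
      rw [pv_eeaLoop_sym f]
      rw [ih (PySem.Int.mod n a) a (res ++ [PySem.Int.floordiv n a])
        hfm1 (by simpa [PySem.Int.mod] using hfm2) (by simp [PySem.Int.mod]; omega)]
      rw [show euclidQuots n a = Int.fdiv n a :: euclidQuots a (Int.fmod n a) from by
        rw [euclidQuots]; simp [hapos]]
      simp [PySem.Int.mod, PySem.Int.floordiv]

-- ---- back-substitution = fold ----

theorem pv_eeaFix_fold (k : Nat) : ∀ (qs : List Int) (p2 p1 : Int), qs.length ≤ k →
    pvL2 (p2 :: p1 :: eeaFix p2 p1 qs) = ((qs.foldl pvStep (p2, p1)).1) := by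
  induction k with
  | zero =>
    intro qs p2 p1 hk
    have : qs = [] := by cases qs <;> simp_all
    subst this
    rw [eeaFix]
    rw [pv_pvL2_eq _ (by simp)]
    simp
  | succ k ih =>
    intro qs p2 p1 hk
    match qs with
    | [] =>
      rw [eeaFix]
      rw [pv_pvL2_eq _ (by simp)]
      simp
    | [q] =>
      rw [eeaFix]
      rw [pv_pvL2_eq _ (by simp)]
      simp [pvStep]
    | q :: q' :: rest =>
      rw [eeaFix]
      rw [pv_pvL2_cons p2 _ (by
        have : eeaFix p1 (p2 + -q * p1) (q' :: rest) ≠ [] := by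
          cases rest <;> (rw [eeaFix]; simp)
        simp only [List.length_cons]
        have := List.length_pos_iff.mpr this
        omega)]
      have := ih (q' :: rest) p1 (p2 + -q * p1) (by simp only [List.length_cons] at hk ⊢; omega)
      rw [this]
      simp only [List.foldl_cons]
      rw [show pvStep (p2, p1) q = (p1, p2 + -q * p1) from by simp [pvStep]; ring]

-- ---- fold over quotients: invariant ----

theorem pv_fold_quots (N A : Int) (x y : Int) : ∀ (t0 t1 : Int),
    0 ≤ y → y < x → t0 * A ≡ x [ZMOD N] → t1 * A ≡ y [ZMOD N] →
    ((euclidQuots x y).foldl pvStep (t0, t1)).1 * A ≡ (Int.gcd x y : Int) [ZMOD N] := by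
  induction x, y using euclidQuots.induct with
  | case1 x y hy ih =>
    intro t0 t1 h0 hxy h1 h2
    rw [euclidQuots]; simp only [hy, dite_true, List.foldl_cons]
    rw [show pvStep (t0, t1) (Int.fdiv x y) = (t1, t0 - Int.fdiv x y * t1) from rfl]
    have hinv : (t0 - Int.fdiv x y * t1) * A ≡ Int.fmod x y [ZMOD N] := by
      have hfm : Int.fmod x y = x - Int.fdiv x y * y := by
        have := Int.fmod_add_fdiv x y; linarith
      rw [hfm]
      calc (t0 - Int.fdiv x y * t1) * A = t0 * A - Int.fdiv x y * (t1 * A) := by ring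
        _ ≡ x - Int.fdiv x y * y [ZMOD N] := h1.sub (h2.mul_left _)
    have hb1 : 0 ≤ Int.fmod x y := Int.fmod_nonneg_of_pos x hy
    have hb2 : Int.fmod x y < y := Int.fmod_lt_of_pos x hy
    have hrec := ih t1 (t0 - Int.fdiv x y * t1) hb1 hb2 h2 hinv
    have hg : (Int.gcd y (Int.fmod x y) : Int) = (Int.gcd x y : Int) := by
      norm_cast; rw [pv_gcd_fmod]
    rw [hg] at hrec
    exact hrec
  | case2 x y hy =>
    intro t0 t1 h0 hxy h1 h2
    have hy0 : y = 0 := by omega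
    subst hy0
    rw [euclidQuots]; rw [dif_neg hy]; simp only [List.foldl_nil]
    have : (Int.gcd x 0 : Int) = x := by rw [Int.gcd_zero_right]; omega
    rw [this]; exact h1

-- ---- extended_euclidean_algorithm spec ----

theorem pv_eea_spec (a n : Int) (ha : 0 ≤ a) (han : a < n) :
    extended_euclidean_algorithm a n * a ≡ (Int.gcd n a : Int) [ZMOD n] := by
  rw [extended_euclidean_algorithm]
  rw [pv_eeaLoop_quots (a.natAbs + n.natAbs + 1) a n [0, 1] ha han (by omega)]
  simp only [List.cons_append, List.nil_append]
  rw [show ((PySem.List.pyGet? ((0:Int) :: 1 :: eeaFix 0 1 (euclidQuots n a)) (-2)).getD 0) = pvL2 ((0:Int) :: 1 :: eeaFix 0 1 (euclidQuots n a)) from rfl]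
  rw [pv_eeaFix_fold (euclidQuots n a).length (euclidQuots n a) 0 1 le_rfl]
  apply pv_fold_quots n a n a 0 1 ha han
  · show (0:Int) * a ≡ n [ZMOD n]
    have : (n:Int) ≡ 0 [ZMOD n] := (Int.modEq_zero_iff_dvd).mpr dvd_rfl
    simpa using this.symm
  · simp

-- ---- fmod helpers ----

theorem pv_fmod_emod (x n : Int) (hn : 0 < n) : Int.fmod x n = x % n := by
  rw [Int.fmod_eq_emod]; simp [hn.le]

theorem pv_fmod_congr (x y n : Int) (hn : 0 < n) (h : x ≡ y [ZMOD n]) :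
    Int.fmod x n = Int.fmod y n := by
  rw [pv_fmod_emod x n hn, pv_fmod_emod y n hn]; exact h

theorem pv_fmod_self (x n : Int) (hx : 0 ≤ x) (hxn : x < n) : Int.fmod x n = x := by
  rw [pv_fmod_emod x n (by omega), Int.emod_eq_of_lt hx hxn]

theorem pv_inv_unique (N t x A : Int) (h1 : t * A ≡ 1 [ZMOD N]) (h2 : x * A ≡ 1 [ZMOD N]) :
    t ≡ x [ZMOD N] := by
  calc t = t * 1 := by ring
    _ ≡ t * (x * A) [ZMOD N] := h2.symm.mul_left t
    _ = x * (t * A) := by ring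
    _ ≡ x * 1 [ZMOD N] := h1.mul_left x
    _ = x := by ring

-- ---- A's append loop = B's map over a range ----

theorem pv_buildList (m x0 : Int) : ∀ (j : Nat),
    (PySem.List.pyRange 1 (1 + (j:Int))).foldl (fun res _ => res ++ [pvL1 res + m]) [x0]
    = (PySem.List.pyRange 0 (1 + (j:Int))).map (fun k => x0 + k * m) := by
  intro j
  induction j with
  | zero =>
    norm_num
    rw [show PySem.List.pyRange (0:Int) 1 = [0] from rfl]
    simp
  | succ j ih =>
    have hc : (1 + ((j:Int) + 1)) = (1 + (j:Int)) + 1 := by ring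
    push_cast
    rw [hc]
    rw [PySem.List.pyRange_one_succ_right (by omega : (1:Int) ≤ 1 + (j:Int))]
    rw [PySem.List.pyRange_one_succ_right (by omega : (0:Int) ≤ 1 + (j:Int))]
    rw [List.foldl_append, ih, List.map_append]
    simp only [List.foldl_cons, List.foldl_nil, List.map_cons, List.map_nil]
    congr 1
    · congr 1
      rw [show (1 + (j:Int)) = (j:Int) + 1 from by ring]
      rw [PySem.List.pyRange_one_succ_right (by omega : (0:Int) ≤ (j:Int))]
      rw [List.map_append]
      simp only [List.map_cons, List.map_nil]
      rw [pv_pvL1_append]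
      ring

-- ---- main equivalence, one unfolding of A's (depth ≤ 2) recursion ----

theorem pv_core (f : Nat) (a b n : Int) (hn : 0 < n) :
    mesCore (f + 2) a b n = modular_equation_solver_alt a b n := by
  have ha'0 : 0 ≤ Int.fmod a n := Int.fmod_nonneg_of_pos a hn
  have ha'n : Int.fmod a n < n := Int.fmod_lt_of_pos a hn
  have hb'0 : 0 ≤ Int.fmod b n := Int.fmod_nonneg_of_pos b hn
  have hb'n : Int.fmod b n < n := Int.fmod_lt_of_pos b hn
  have hinv1 : (0:Int) * Int.fmod a n ≡ n [ZMOD n] := by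
    have h0 : (n:Int) ≡ 0 [ZMOD n] := (Int.modEq_zero_iff_dvd).mpr dvd_rfl
    simpa using h0.symm
  have hinv2 : (1:Int) * Int.fmod a n ≡ Int.fmod a n [ZMOD n] := by
    simp
  obtain ⟨hg1, hg2⟩ := pv_egcdLoop_spec n (Int.fmod a n) (Int.fmod a n).natAbs
    n (Int.fmod a n) 0 1 le_rfl hn.le ha'0 hinv1 hinv2
  rw [Int.gcd_comm n (Int.fmod a n)] at hg1 hg2
  rw [mesCore, modular_equation_solver_alt]
  simp only [PySem.Int.mod, PySem.Int.floordiv]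
  rw [pv_gcd_eq, hg1]
  by_cases hd1 : Int.gcd (Int.fmod a n) n = 1
  · -- gcd = 1 : both return the single solution
    have hd1' : ((Int.gcd (Int.fmod a n) n : Nat) : Int) = 1 := by exact_mod_cast hd1
    rw [hd1', if_pos rfl, Int.fmod_one, Int.fdiv_one, Int.fdiv_one]
    rw [if_neg (by simp)]
    rw [show PySem.List.pyRange (0:Int) 1 = [0] from rfl]
    simp only [List.map_cons, List.map_nil, zero_mul, add_zero]
    have ht : extended_euclidean_algorithm (Int.fmod a n) n * Int.fmod a n ≡ 1 [ZMOD n] := by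
      have h := pv_eea_spec (Int.fmod a n) n ha'0 ha'n
      rwa [Int.gcd_comm n (Int.fmod a n), hd1', ] at h
    have hx : (egcdLoop n (Int.fmod a n) 0 1).2 * Int.fmod a n ≡ 1 [ZMOD n] := by
      rwa [hd1'] at hg2
    have hcong := pv_inv_unique n _ _ _ ht hx
    rw [pv_fmod_congr _ _ n hn (hcong.mul_right (Int.fmod b n))]
  · -- gcd = d ≥ 2
    have hdpos : 0 < Int.gcd (Int.fmod a n) n := by
      rcases Nat.eq_zero_or_pos (Int.gcd (Int.fmod a n) n) with h | h
      · exfalso; rw [Int.gcd_eq_zero_iff] at h; omega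
      · exact h
    have hd2 : 2 ≤ Int.gcd (Int.fmod a n) n := by
      omega
    rw [if_neg (fun hh => hd1 (by exact_mod_cast hh))]
    by_cases hdb : Int.fmod (Int.fmod b n) ((Int.gcd (Int.fmod a n) n : Nat) : Int) = 0
    · -- d divides b : d solutions
      rw [if_pos hdb, if_neg (by simpa using hdb)]
      have hdZpos : (0:Int) < ((Int.gcd (Int.fmod a n) n : Nat) : Int) := by exact_mod_cast hdpos
      have hdva : ((Int.gcd (Int.fmod a n) n : Nat) : Int) ∣ Int.fmod a n := Int.gcd_dvd_left _ _
      have hdvn : ((Int.gcd (Int.fmod a n) n : Nat) : Int) ∣ n := Int.gcd_dvd_right _ _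
      have hdvb : ((Int.gcd (Int.fmod a n) n : Nat) : Int) ∣ Int.fmod b n := by
        rw [pv_fmod_emod _ _ hdZpos] at hdb
        exact Int.dvd_of_emod_eq_zero hdb
      have hfd : ∀ z : Int, Int.fdiv z ((Int.gcd (Int.fmod a n) n : Nat) : Int) = z / ((Int.gcd (Int.fmod a n) n : Nat) : Int) := by
        intro z; rw [Int.fdiv_eq_ediv]; simp [hdZpos.le]
      rw [hfd, hfd, hfd]
      have hle : ((Int.gcd (Int.fmod a n) n : Nat) : Int) ≤ n := Int.le_of_dvd hn hdvn
      have hn2 : (0:Int) < n / ((Int.gcd (Int.fmod a n) n : Nat) : Int) := by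
        have h1 : (1:Int) ≤ n / ((Int.gcd (Int.fmod a n) n : Nat) : Int) := by
          rw [Int.le_ediv_iff_mul_le hdZpos]; omega
        omega
      have e1 : Int.fmod a n / ((Int.gcd (Int.fmod a n) n : Nat) : Int) * ((Int.gcd (Int.fmod a n) n : Nat) : Int) = Int.fmod a n := Int.ediv_mul_cancel hdva
      have e2 : n / ((Int.gcd (Int.fmod a n) n : Nat) : Int) * ((Int.gcd (Int.fmod a n) n : Nat) : Int) = n := Int.ediv_mul_cancel hdvn
      have e3 : Int.fmod b n / ((Int.gcd (Int.fmod a n) n : Nat) : Int) * ((Int.gcd (Int.fmod a n) n : Nat) : Int) = Int.fmod b n := Int.ediv_mul_cancel hdvb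
      have ha2 : 0 ≤ Int.fmod a n / ((Int.gcd (Int.fmod a n) n : Nat) : Int) := Int.ediv_nonneg ha'0 hdZpos.le
      have hb2 : 0 ≤ Int.fmod b n / ((Int.gcd (Int.fmod a n) n : Nat) : Int) := Int.ediv_nonneg hb'0 hdZpos.le
      have ha2n : Int.fmod a n / ((Int.gcd (Int.fmod a n) n : Nat) : Int) < n / ((Int.gcd (Int.fmod a n) n : Nat) : Int) := by
        apply lt_of_mul_lt_mul_right _ hdZpos.le
        rw [e1, e2]; exact ha'n
      have hb2n : Int.fmod b n / ((Int.gcd (Int.fmod a n) n : Nat) : Int) < n / ((Int.gcd (Int.fmod a n) n : Nat) : Int) := by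
        apply lt_of_mul_lt_mul_right _ hdZpos.le
        rw [e3, e2]; exact hb'n
      have hgcd1 : Int.gcd (Int.fmod a n / ((Int.gcd (Int.fmod a n) n : Nat) : Int)) (n / ((Int.gcd (Int.fmod a n) n : Nat) : Int)) = 1 :=
        Int.gcd_div_gcd_div_gcd hdpos
      -- unfold the inner (gcd = 1) recursive call
      rw [mesCore]
      simp only [PySem.Int.mod, PySem.Int.floordiv]
      rw [pv_fmod_self _ _ ha2 ha2n, pv_fmod_self _ _ hb2 hb2n, pv_gcd_eq]
      rw [show ((Int.gcd (Int.fmod a n / ((Int.gcd (Int.fmod a n) n : Nat) : Int)) (n / ((Int.gcd (Int.fmod a n) n : Nat) : Int)) : Nat) : Int) = 1 from by exact_mod_cast hgcd1]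
      rw [if_pos rfl]
      simp only [List.head?_cons, Option.getD_some]
      -- B's base solution equals A's base solution
      have ht2 : extended_euclidean_algorithm (Int.fmod a n / ((Int.gcd (Int.fmod a n) n : Nat) : Int)) (n / ((Int.gcd (Int.fmod a n) n : Nat) : Int)) * (Int.fmod a n / ((Int.gcd (Int.fmod a n) n : Nat) : Int)) ≡ 1 [ZMOD n / ((Int.gcd (Int.fmod a n) n : Nat) : Int)] := by
        have h := pv_eea_spec _ _ ha2 ha2n
        rwa [Int.gcd_comm (n / ((Int.gcd (Int.fmod a n) n : Nat) : Int)) (Int.fmod a n / ((Int.gcd (Int.fmod a n) n : Nat) : Int)),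
          show ((Int.gcd (Int.fmod a n / ((Int.gcd (Int.fmod a n) n : Nat) : Int)) (n / ((Int.gcd (Int.fmod a n) n : Nat) : Int)) : Nat) : Int) = 1 from by exact_mod_cast hgcd1] at h
      have key : (egcdLoop n (Int.fmod a n) 0 1).2 * (Int.fmod a n / ((Int.gcd (Int.fmod a n) n : Nat) : Int)) ≡ 1 [ZMOD n / ((Int.gcd (Int.fmod a n) n : Nat) : Int)] := by
        obtain ⟨K, hK⟩ := Int.modEq_iff_dvd.mp hg2
        rw [Int.modEq_iff_dvd]
        refine ⟨K, ?_⟩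
        apply mul_left_cancel₀ (show ((Int.gcd (Int.fmod a n) n : Nat) : Int) ≠ 0 from by omega)
        linear_combination hK - (egcdLoop n (Int.fmod a n) 0 1).2 * e1 - K * e2
      have hcong := pv_inv_unique _ _ _ _ ht2 key
      rw [pv_fmod_congr _ _ _ hn2 ((hcong.symm).mul_right (Int.fmod b n / ((Int.gcd (Int.fmod a n) n : Nat) : Int)))]
      rw [show ((Int.gcd (Int.fmod a n) n : Nat) : Int) = 1 + ((Int.gcd (Int.fmod a n) n - 1 : Nat) : Int) from by omega]
      exact pv_buildList _ _ _
    · rw [if_neg hdb, if_pos hdb]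

theorem modular_equation_solver_spec : Claim_equal_modular_equation_solver := by
  intro a b n _ hpre
  show modular_equation_solver a b n = modular_equation_solver_alt a b n
  rw [modular_equation_solver, show n.natAbs + 1 = (n.natAbs - 1) + 2 from by
    have : 0 < n := hpre
    omega]
  exact pv_core (n.natAbs - 1) a b n hpre
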